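-- pv_equiv track=rewrite | github.com/qiqi-impact/cp | other/processes.py | exectime
-- ===== SOURCE A (Python) =====
-- def exectime(arr):
--     d = {}
--     for n in arr:
--         if n not in d:
--             d[n] = 0
--         d[n] += 1
--     ret = 0
--     for k, v in d.items():
--         for i in range(v):
--             ret += k
--             k = (k+1)//2
--     return ret
-- ===== SOURCE B (Python) =====
-- def exectime(arr):
--     ret = 0
--     prev = None
--     k = 0
--     for x in sorted(arr):
--         if x != prev:
--             prev = x
--             k = x
--         ret += k
--         k = (k + 1) // 2
--     return ret
-- ===== Notes on version B (the rewrite author's own statement) =====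
-- stated objective: alternative
-- what changed: Replaced the dict-counting pass plus per-key inner loops by a single fold over the sorted list that restarts the ceil-halving chain whenever the value changes.
import Mathlib
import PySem

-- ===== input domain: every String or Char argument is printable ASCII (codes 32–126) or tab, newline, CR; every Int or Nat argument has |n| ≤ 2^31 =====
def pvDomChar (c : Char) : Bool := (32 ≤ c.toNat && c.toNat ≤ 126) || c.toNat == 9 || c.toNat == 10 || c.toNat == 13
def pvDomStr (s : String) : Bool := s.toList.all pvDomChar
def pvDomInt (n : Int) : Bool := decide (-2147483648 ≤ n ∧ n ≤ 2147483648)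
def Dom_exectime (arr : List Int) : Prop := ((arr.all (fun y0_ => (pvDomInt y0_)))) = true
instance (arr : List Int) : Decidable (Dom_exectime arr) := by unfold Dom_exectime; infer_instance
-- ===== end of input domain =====

-- B replaces A's dict-counting pass by a sort-then-scan over maximal runs of equal values
-- (same ceil-halving inner loop); objective: alternative (same result, different data strategy).

-- ===== PORT A =====
def exectime (arr : List Int) : Int :=
  -- d = {}; for n in arr: if n not in d: d[n] = 0; d[n] += 1
  let d := arr.foldl (fun d n =>
    let d := if d.contains n then d else d.insert n 0
    d.insert n (d.getD n 0 + 1)) PySem.Dict.empty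
  -- ret = 0; for k, v in d.items(): for i in range(v): ret += k; k = (k+1)//2
  d.items.foldl (fun ret kv =>
    ((PySem.List.pyRange 0 kv.2).foldl
      (fun (p : Int × Int) _ => (p.1 + p.2, PySem.Int.floordiv (p.2 + 1) 2)) (ret, kv.1)).1) 0

-- ===== PORT B =====
-- the body of Source B's for loop; state = (ret, prev, k); prev = None is Option.none
def altStep (st : Int × Option Int × Int) (x : Int) : Int × Option Int × Int :=
  -- if x != prev: prev = x; k = x
  let pk := if some x ≠ st.2.1 then (some x, x) else (st.2.1, st.2.2)
  -- ret += k; k = (k + 1) // 2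
  (st.1 + pk.2, pk.1, PySem.Int.floordiv (pk.2 + 1) 2)

def exectime_alt (arr : List Int) : Int :=
  ((PySem.List.sorted arr (fun x => x) false).foldl altStep (0, none, 0)).1

-- ===== PRECONDITION & SPEC =====
def Spec_exectime (arr : List Int) (out : Int) : Prop := out = exectime_alt arr
instance (arr : List Int) (out : Int) : Decidable (Spec_exectime arr out) := by unfold Spec_exectime; infer_instance

-- ===== CLAIM (what is proved, stated in full; the proofs are below) =====
def Claim_equal_exectime : Prop := ∀ (arr : List Int), Dom_exectime arr → Spec_exectime arr (exectime arr)

-- ===== LEMMAS AND PROOFS =====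

-- the ceil-halving contribution of one value k occurring n times
def loop (k : Int) : Nat → Int
  | 0 => 0
  | n + 1 => k + loop (PySem.Int.floordiv (k + 1) 2) n

-- the shared inner loop: its first component adds loop k (length) to the accumulator
theorem fold_inner {α : Type} (l : List α) (ret k : Int) :
    (l.foldl (fun (p : Int × Int) _ => (p.1 + p.2, PySem.Int.floordiv (p.2 + 1) 2)) (ret, k)).1
      = ret + loop k l.length := by
  induction l generalizing ret k with
  | nil => simp [loop]
  | cons x xs ih =>
    rw [List.foldl_cons, ih]
    show ret + k + _ = ret + loop k (xs.length + 1)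
    rw [loop]; ring

theorem length_pyRange_nat (c : Nat) : (PySem.List.pyRange 0 (c : Int)).length = c := by
  simp [PySem.List.pyRange_zero_natCast]

-- A computes the sum, over the distinct values of arr, of loop k (multiplicity of k)
theorem exectime_eq_sum (arr : List Int) :
    exectime arr = ((PySem.Set.ofList arr).map (fun k => loop k (arr.count k))).sum := by
  have hcnt : arr.foldl (fun d n =>
      let d := if d.contains n then d else d.insert n 0
      d.insert n (d.getD n 0 + 1)) PySem.Dict.empty = PySem.Dict.counter arr := by
    rw [← PySem.Dict.foldl_insert_getD_add_one_eq_counter]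
    apply PySem.List.foldl_congr_mem
    intro d n _
    by_cases h : d.contains n
    · simp [h]
    · have h' : d.contains n = false := by simpa using h
      simp only [h', Bool.false_eq_true, if_false]
      rw [PySem.Dict.getD_insert_self, PySem.Dict.insert_insert_self,
        PySem.Dict.getD_of_not_contains d 0 h']
  show (PySem.Dict.items _).foldl _ 0 = _
  rw [hcnt, PySem.Dict.items_counter, List.foldl_map]
  have h2 : ∀ (ret : Int) (k : Int), k ∈ PySem.Set.ofList arr →
      ((PySem.List.pyRange 0 ((arr.count k : Nat) : Int)).foldl
        (fun (p : Int × Int) _ => (p.1 + p.2, PySem.Int.floordiv (p.2 + 1) 2)) (ret, k)).1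
        = ret + loop k (arr.count k) := by
    intro ret k _
    rw [fold_inner, length_pyRange_nat]
  show List.foldl (fun ret k =>
      ((PySem.List.pyRange 0 ((arr.count k : Nat) : Int)).foldl
        (fun (p : Int × Int) _ => (p.1 + p.2, PySem.Int.floordiv (p.2 + 1) 2)) (ret, k)).1)
      0 (PySem.Set.ofList arr) = _
  rw [PySem.List.foldl_congr_mem _ _ (fun ret k => ret + loop k (arr.count k)) _ h2, PySem.List.foldl_add]
  simp

-- the halving chain that Source B's k traverses inside one run
def hrep (k : Int) : Nat → Int
  | 0 => k
  | m + 1 => hrep (PySem.Int.floordiv (k + 1) 2) m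

-- inside a run whose value is already prev, the fold adds loop k m and halves m times
theorem fold_rep_same (m : Nat) : ∀ (ret k0 k : Int),
    (List.replicate m k0).foldl altStep (ret, some k0, k) = (ret + loop k m, some k0, hrep k m) := by
  induction m with
  | zero => intro ret k0 k; simp [loop, hrep]
  | succ m ih =>
    intro ret k0 k
    rw [List.replicate_succ, List.foldl_cons]
    show (List.replicate m k0).foldl altStep (altStep (ret, some k0, k) k0) = _
    rw [show altStep (ret, some k0, k) k0
        = (ret + k, some k0, PySem.Int.floordiv (k + 1) 2) by simp [altStep]]
    rw [ih]
    rw [show loop k (m + 1) = k + loop (PySem.Int.floordiv (k + 1) 2) m from rfl,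
      show hrep k (m + 1) = hrep (PySem.Int.floordiv (k + 1) 2) m from rfl]
    ring_nf

-- entering a fresh run (prev ≠ its value) resets k and then behaves like fold_rep_same
theorem fold_rep_new (m : Nat) (ret k0 k : Int) (p : Option Int) (hp : p ≠ some k0) :
    (List.replicate (m + 1) k0).foldl altStep (ret, p, k)
      = (ret + loop k0 (m + 1), some k0, hrep k0 (m + 1)) := by
  rw [List.replicate_succ, List.foldl_cons]
  rw [show altStep (ret, p, k) k0 = (ret + k0, some k0, PySem.Int.floordiv (k0 + 1) 2) by
    simp [altStep, Ne.symm hp]]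
  rw [fold_rep_same]
  rw [show loop k0 (m + 1) = k0 + loop (PySem.Int.floordiv (k0 + 1) 2) m from rfl,
    show hrep k0 (m + 1) = hrep (PySem.Int.floordiv (k0 + 1) 2) m from rfl]
  ring_nf

-- B's fold on a ≤-sorted list computes the run-indexed sum
theorem fold_sorted_sum : ∀ (n : Nat) (s : List Int), s.length ≤ n →
    s.Pairwise (· ≤ ·) → ∀ (ret : Int) (p : Option Int) (k : Int), (∀ v ∈ s, p ≠ some v) →
    (s.foldl altStep (ret, p, k)).1
      = ret + ((PySem.Set.ofList s).map (fun v => loop v (s.count v))).sum := by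
  intro n
  induction n with
  | zero =>
    intro s hlen _ ret p k _
    have : s = [] := List.length_eq_zero_iff.mp (Nat.le_zero.mp hlen)
    subst this
    simp [PySem.Set.ofList]
  | succ m ih =>
    intro s hlen hsort ret p k hp
    match s with
    | [] => simp [PySem.Set.ofList]
    | k0 :: t =>
      have hs : k0 :: t = (k0 :: t).takeWhile (fun x => x == k0) ++ (k0 :: t).dropWhile (fun x => x == k0) :=
        (List.takeWhile_append_dropWhile).symm
      set run := (k0 :: t).takeWhile (fun x => x == k0) with hrun
      set rest := (k0 :: t).dropWhile (fun x => x == k0) with hrest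
      have hrunk : ∀ x ∈ run, x = k0 := by
        intro x hx
        have := List.mem_takeWhile_imp hx
        simpa using this
      have hc1 : 1 ≤ run.length := by
        rw [hrun]; simp
      have hdrop : (k0 :: t).drop run.length = rest := by
        conv_lhs => rw [hs]
        exact List.drop_left
      have hrestlen : rest.length ≤ m := by
        have : run.length + rest.length = (k0 :: t).length := by
          rw [hs]; simp
        simp only [List.length_cons] at this hlen
        omega
      have hrestsub : rest.Sublist (k0 :: t) := by
        rw [hrest]; exact List.dropWhile_sublist _
      have hrestsort : rest.Pairwise (· ≤ ·) := hsort.sublist hrestsub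
      -- k0 does not occur in rest
      have hk0rest : k0 ∉ rest := by
        intro hmem
        obtain ⟨r0, rt, hr⟩ := List.exists_cons_of_ne_nil (List.ne_nil_of_mem hmem)
        have hr0ne : ¬ (r0 == k0) = true := by
          have hh := List.head?_dropWhile_not (fun x => x == k0) (k0 :: t)
          rw [← hrest, hr] at hh
          simpa using hh
        have hr0mem : r0 ∈ k0 :: t := hrestsub.mem (by rw [hr]; exact List.mem_cons_self)
        have hle : k0 ≤ r0 := by
          rcases List.mem_cons.mp hr0mem with h | h
          · omega
          · exact (List.pairwise_cons.mp hsort).1 r0 h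
        have hlt : k0 < r0 := lt_of_le_of_ne hle (by intro h; exact hr0ne (by simp [h.symm]))
        rw [hr] at hmem hrestsort
        rcases List.mem_cons.mp hmem with h | h
        · omega
        · have : r0 ≤ k0 := (List.pairwise_cons.mp hrestsort).1 k0 h
          omega
      -- counts
      have hcount0 : (k0 :: t).count k0 = run.length := by
        conv_lhs => rw [hs]
        rw [List.count_append]
        have h1 : run.count k0 = run.length :=
          List.count_eq_length.mpr (fun x hx => (hrunk x hx).symm)
        have h2 : rest.count k0 = 0 := List.count_eq_zero.mpr hk0rest
        omega
      have hcountne : ∀ k, k ≠ k0 → (k0 :: t).count k = rest.count k := by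
        intro k hk
        conv_lhs => rw [hs]
        rw [List.count_append]
        have : run.count k = 0 := List.count_eq_zero.mpr (fun hm => hk (hrunk k hm))
        omega
      -- the distinct values of s are k0 together with those of rest
      have hperm : (PySem.Set.ofList (k0 :: t)).Perm (k0 :: PySem.Set.ofList rest) := by
        rw [List.perm_ext_iff_of_nodup (PySem.Set.nodup_ofList _)
          (by simp [List.nodup_cons, PySem.Set.nodup_ofList, PySem.Set.mem_ofList, hk0rest])]
        intro a
        simp only [PySem.Set.mem_ofList, List.mem_cons]
        constructor
        · rintro (h | h)
          · exact Or.inl h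
          · by_cases ha : a = k0
            · exact Or.inl ha
            · right
              have : a ∈ run ++ rest := by rw [← hs]; exact List.mem_cons_of_mem _ h
              rcases List.mem_append.mp this with h' | h'
              · exact absurd (hrunk a h') ha
              · exact h'
        · rintro (h | h)
          · exact Or.inl h
          · rcases List.mem_cons.mp (hrestsub.mem h) with h' | h'
            · exact Or.inl h'
            · exact Or.inr h'
      -- run is a block of copies of k0
      obtain ⟨c, hc⟩ : ∃ c, run.length = c + 1 := ⟨run.length - 1, by omega⟩
      have hrep_run : run = List.replicate (c + 1) k0 := by
        rw [List.eq_replicate_iff]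
        exact ⟨by omega, hrunk⟩
      -- one pass over s = run ++ rest
      conv_lhs => rw [hs]
      rw [List.foldl_append, hrep_run, fold_rep_new c ret k0 k p (hp k0 (List.mem_cons_self))]
      rw [ih rest hrestlen hrestsort _ (some k0) _
        (fun v hv h => hk0rest (by rw [Option.some_inj] at h; rw [h]; exact hv))]
      rw [(hperm.map _).sum_eq]
      simp only [List.map_cons, List.sum_cons]
      have hmapeq : (PySem.Set.ofList rest).map (fun k => loop k (rest.count k))
          = (PySem.Set.ofList rest).map (fun k => loop k ((k0 :: t).count k)) :=
        List.map_congr_left (fun a ha => by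
          have ha' : a ∈ rest := (PySem.Set.mem_ofList _ _).mp ha
          have hane : a ≠ k0 := by rintro rfl; exact hk0rest ha'
          rw [hcountne a hane])
      rw [hmapeq, hcount0, hc]
      ring

theorem exectime_alt_eq_sum (arr : List Int) :
    exectime_alt arr = ((PySem.Set.ofList arr).map (fun k => loop k (arr.count k))).sum := by
  unfold exectime_alt
  set s := PySem.List.sorted arr (fun x => x) false with hsdef
  have hperm : s.Perm arr := PySem.List.sorted_perm arr _ _
  have hsort : s.Pairwise (· ≤ ·) := PySem.List.sorted_pairwise arr (fun x => x)
  show (s.foldl altStep (0, none, 0)).1 = _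
  rw [fold_sorted_sum s.length s le_rfl hsort 0 none 0 (fun v _ h => by cases h), zero_add]
  have hsetperm : (PySem.Set.ofList s).Perm (PySem.Set.ofList arr) := by
    rw [List.perm_ext_iff_of_nodup (PySem.Set.nodup_ofList _) (PySem.Set.nodup_ofList _)]
    intro a
    rw [PySem.Set.mem_ofList, PySem.Set.mem_ofList]
    exact hperm.mem_iff
  rw [List.map_congr_left (fun a _ => by rw [hperm.count_eq]), (hsetperm.map _).sum_eq]

-- ===== VERDICT (by name: the statement is the Claim_ definition above) =====
theorem exectime_spec : Claim_equal_exectime := by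
  intro arr _
  unfold Spec_exectime
  rw [exectime_eq_sum, exectime_alt_eq_sum]
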